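-- pv_equiv track=rewrite | github.com/Imhv0609/Concept_Map_Universal_version2_LangSmith | timeline_mapper.py | map_concepts_to_sentences
-- ===== SOURCE A (Python) =====
-- from typing import Dict, List, Tuple
--
-- def map_concepts_to_sentences(
--     concepts: List[Dict],
--     relationships: List[Dict],
--     sentences: List[str]
-- ) -> Dict[int, Dict]:
--     """
--     Map concepts and relationships to sentences using simple heuristic:
--     A concept belongs to the first sentence where its name appears.
--
--     Args:
--         concepts: List of concept dicts with 'name' keys
--         relationships: List of relationship dicts
--         sentences: List of sentence strings
--
--     Returns:
--         Dict mapping sentence index to {concepts, relationships}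
--     """
--     sentence_map = {i: {"concepts": [], "relationships": []} for i in range(len(sentences))}
--
--     # Map concepts to sentences
--     for concept in concepts:
--         concept_name = concept.get('name', '').lower()
--         assigned = False
--
--         # Find first sentence containing this concept name
--         for idx, sentence in enumerate(sentences):
--             if concept_name in sentence.lower():
--                 sentence_map[idx]["concepts"].append(concept)
--                 assigned = True
--                 break
--
--         # If not found in any sentence, assign to first sentence
--         if not assigned and sentences:
--             sentence_map[0]["concepts"].append(concept)
--
--     # Map relationships to sentences
--     # Strategy: Assign relationship to the sentence where its "to" concept appears
--     for relationship in relationships: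
--         to_concept = relationship.get('to', '').lower()
--         assigned = False
--
--         for idx, sentence in enumerate(sentences):
--             if to_concept in sentence.lower():
--                 sentence_map[idx]["relationships"].append(relationship)
--                 assigned = True
--                 break
--
--         # If not found, assign to first sentence
--         if not assigned and sentences:
--             sentence_map[0]["relationships"].append(relationship)
--
--     return sentence_map
-- ===== SOURCE B (Python) =====
-- def map_concepts_to_sentences(concepts, relationships, sentences):
--     # Inverted, sentence-major scan: walk the sentences once with a shrinking
--     # worklist of distinct lowered names, recording each name's first-match
--     # index (early exit when the worklist empties), then bucket the items by
--     # their memoized index (missing name -> index 0) and emit the map.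
--     names = [c.get('name', '').lower() for c in concepts]
--     tos = [r.get('to', '').lower() for r in relationships]
--     pending = list(dict.fromkeys(names + tos))
--     tag = {}
--     for i, s in enumerate(sentences):
--         if not pending:
--             break
--         low = s.lower()
--         still = []
--         for n in pending:
--             if n in low:
--                 tag[n] = i
--             else:
--                 still.append(n)
--         pending = still
--     bc, br = {}, {}
--     for c, n in zip(concepts, names):
--         bc.setdefault(tag.get(n, 0), []).append(c)
--     for r, n in zip(relationships, tos):
--         br.setdefault(tag.get(n, 0), []).append(r)
--     return {i: {"concepts": bc.get(i, []), "relationships": br.get(i, [])}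
--             for i in range(len(sentences))}
-- ===== Notes on version B (the rewrite author's own statement) =====
-- stated objective: alternative
-- what changed: B inverts the loop nesting: instead of A's pattern-major rescan of all sentences per concept/relationship, B walks the sentences once (sentence-major) with a shrinking worklist of distinct lowered names, memoizes each name's first-match index with early exit when the worklist empties, then buckets the items by their memoized index in one pass; duplicate names are matched once instead of once per item.
import Mathlib
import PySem

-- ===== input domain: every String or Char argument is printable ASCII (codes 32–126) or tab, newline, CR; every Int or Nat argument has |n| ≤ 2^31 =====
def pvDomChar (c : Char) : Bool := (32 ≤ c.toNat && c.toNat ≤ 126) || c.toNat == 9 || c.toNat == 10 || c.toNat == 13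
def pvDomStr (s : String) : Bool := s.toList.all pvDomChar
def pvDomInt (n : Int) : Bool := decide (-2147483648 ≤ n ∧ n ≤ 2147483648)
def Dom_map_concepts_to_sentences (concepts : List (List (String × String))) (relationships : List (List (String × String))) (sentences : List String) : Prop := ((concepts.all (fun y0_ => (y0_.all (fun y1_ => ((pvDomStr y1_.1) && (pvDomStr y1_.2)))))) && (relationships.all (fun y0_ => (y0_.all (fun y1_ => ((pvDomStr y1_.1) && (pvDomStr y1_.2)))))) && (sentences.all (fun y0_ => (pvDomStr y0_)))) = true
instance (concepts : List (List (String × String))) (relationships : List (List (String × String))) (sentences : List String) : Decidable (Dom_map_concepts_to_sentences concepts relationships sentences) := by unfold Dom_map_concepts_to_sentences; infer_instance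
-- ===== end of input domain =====

-- B inverts the loop nesting: one sentence-major pass with a shrinking worklist of distinct
-- lowered names memoizes each name's first-match index (early exit when the worklist empties),
-- then the buckets are assembled from that table (objective: alternative).


-- ===== PORT A =====
-- the inner 'for idx, sentence in enumerate(sentences): if … : break' loop of A
def pvAFind (n : String) : List (Int × String) → Option Int
  | [] => none
  | (i, s) :: rest => if PySem.Str.isIn n (PySem.Str.lower s) then some i else pvAFind n rest

-- {"concepts": [], "relationships": []}
def pvInner0 : PySem.Dict String (List (List (String × String))) :=
  (PySem.Dict.empty.insert "concepts" []).insert "relationships" []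

-- one iteration of A's mapping loop (identical for both loops up to the two key names)
def pvAStep (sentences : List String) (field bucket : String)
    (d : PySem.Dict Int (PySem.Dict String (List (List (String × String)))))
    (item : List (String × String)) :
    PySem.Dict Int (PySem.Dict String (List (List (String × String)))) :=
  let nm := PySem.Str.lower ((List.lookup field item).getD "")
  match pvAFind nm (PySem.List.enumerate sentences 0) with
  | some idx => d.modify idx pvInner0 (fun inner => inner.modify bucket [] (· ++ [item]))
  | none =>
      if sentences.isEmpty then d
      else d.modify 0 pvInner0 (fun inner => inner.modify bucket [] (· ++ [item]))

def map_concepts_to_sentences (concepts : List (List (String × String))) (relationships : List (List (String × String))) (sentences : List String) : List (Int × List (String × List (List (String × String)))) :=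
  let init : PySem.Dict Int (PySem.Dict String (List (List (String × String)))) :=
    (PySem.List.pyRange 0 (sentences.length : Int) 1).foldl
      (fun d i => d.insert i pvInner0) PySem.Dict.empty
  let m1 := concepts.foldl (pvAStep sentences "name" "concepts") init
  let m2 := relationships.foldl (pvAStep sentences "to" "relationships") m1
  m2.items.map (fun p => (p.1, p.2.items))

-- ===== PORT B =====
-- B's sentence-major loop: for each sentence, split the pending worklist into matched names
-- (tagged with this index) and the rest; stop early when the worklist is empty
def pvScan (tag : PySem.Dict String Int) (pending : List String) :
    List (Int × String) → PySem.Dict String Int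
  | [] => tag
  | (i, s) :: rest =>
      if pending.isEmpty then tag
      else
        let low := PySem.Str.lower s
        let r := pending.foldl
          (fun (q : PySem.Dict String Int × List String) n =>
            if PySem.Str.isIn n low then (q.1.insert n i, q.2) else (q.1, q.2 ++ [n]))
          (tag, [])
        pvScan r.1 r.2 rest

def map_concepts_to_sentences_alt (concepts : List (List (String × String))) (relationships : List (List (String × String))) (sentences : List String) : List (Int × List (String × List (List (String × String)))) :=
  let names := concepts.map (fun c => PySem.Str.lower ((List.lookup "name" c).getD ""))
  let tos := relationships.map (fun r => PySem.Str.lower ((List.lookup "to" r).getD ""))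
  let pending := PySem.List.dedup (names ++ tos)
  let tag := pvScan PySem.Dict.empty pending (PySem.List.enumerate sentences 0)
  let bc : PySem.Dict Int (List (List (String × String))) :=
    (concepts.zip names).foldl (fun d p => d.modify (tag.getD p.2 0) [] (· ++ [p.1])) PySem.Dict.empty
  let br : PySem.Dict Int (List (List (String × String))) :=
    (relationships.zip tos).foldl (fun d p => d.modify (tag.getD p.2 0) [] (· ++ [p.1])) PySem.Dict.empty
  (PySem.List.pyRange 0 (sentences.length : Int) 1).map (fun i =>
    (i, [("concepts", bc.getD i []), ("relationships", br.getD i [])]))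

-- ===== PRECONDITION & SPEC =====
def Spec_map_concepts_to_sentences (concepts : List (List (String × String))) (relationships : List (List (String × String))) (sentences : List String) (out : List (Int × List (String × List (List (String × String))))) : Prop := out = map_concepts_to_sentences_alt concepts relationships sentences
instance (concepts : List (List (String × String))) (relationships : List (List (String × String))) (sentences : List String) (out : List (Int × List (String × List (List (String × String))))) : Decidable (Spec_map_concepts_to_sentences concepts relationships sentences out) := by unfold Spec_map_concepts_to_sentences; exact @instDecidableEqList _ (@instDecidableEqProd _ _ inferInstance inferInstance) _ _

-- ===== CLAIM (what is proved, stated in full; the proofs are below) =====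
def Claim_equal_map_concepts_to_sentences : Prop := ∀ (concepts : List (List (String × String))) (relationships : List (List (String × String))) (sentences : List String), Dom_map_concepts_to_sentences concepts relationships sentences → Spec_map_concepts_to_sentences concepts relationships sentences (map_concepts_to_sentences concepts relationships sentences)

-- ===== LEMMAS AND PROOFS =====
-- the sentence index A sends an item to (when sentences is non-empty)
def pvTag (ss : List String) (field : String) (it : List (String × String)) : Int :=
  (pvAFind (PySem.Str.lower ((List.lookup field it).getD "")) (PySem.List.enumerate ss 0)).getD 0

theorem pvAFind_bound (n : String) (ss : List String) (k i : Int)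
    (h : pvAFind n (PySem.List.enumerate ss k) = some i) : k ≤ i ∧ i < k + ss.length := by
  induction ss generalizing k with
  | nil => simp [PySem.List.enumerate_nil, pvAFind] at h
  | cons s t ih =>
      rw [PySem.List.enumerate_cons] at h
      unfold pvAFind at h
      split at h
      · have hk : k = i := by injection h
        simp only [List.length_cons]
        push_cast
        omega
      · have := ih (k + 1) h
        simp only [List.length_cons]
        push_cast
        omega

theorem pvTag_bound (ss : List String) (hne : ss ≠ []) (field : String) (it : List (String × String)) :
    0 ≤ pvTag ss field it ∧ pvTag ss field it < ss.length := by
  unfold pvTag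
  cases h : pvAFind (PySem.Str.lower ((List.lookup field it).getD "")) (PySem.List.enumerate ss 0) with
  | none =>
      have : 0 < ss.length := List.length_pos_of_ne_nil hne
      simp [Option.getD]
      omega
  | some i =>
      have := pvAFind_bound _ _ _ _ h
      simp [Option.getD]
      omega

-- when sentences is non-empty, A's loop body is a single modify at the target index
theorem pvAStep_eq (ss : List String) (hne : ss ≠ []) (field bucket : String) :
    pvAStep ss field bucket
      = fun d it => d.modify (pvTag ss field it) pvInner0
          (fun inner => inner.modify bucket [] (· ++ [it])) := by
  funext d it
  unfold pvAStep pvTag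
  cases h : pvAFind (PySem.Str.lower ((List.lookup field it).getD "")) (PySem.List.enumerate ss 0) with
  | none => simp [h, hne]
  | some i => simp [h]

-- the inner appends, flattened:  getD of the inner fold
theorem innerFold_getD (bucket : String) (cs : List (List (String × String)))
    (inner : PySem.Dict String (List (List (String × String)))) (c : String) :
    (cs.foldl (fun inner it => inner.modify bucket [] (· ++ [it])) inner).getD c []
      = inner.getD c [] ++ (if c = bucket then cs else []) := by
  have h1 : cs.foldl (fun inner it => inner.modify bucket [] (· ++ [it])) inner
      = (cs.map (fun it => (bucket, it))).foldl (fun d p => d.modify p.1 [] (· ++ [p.2])) inner := by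
    rw [List.foldl_map]
  rw [h1, PySem.Dict.getD_foldl_modify_append, List.filter_map]
  by_cases hc : c = bucket
  · subst hc; simp [Function.comp_def]
  · simp [Function.comp_def, Ne.symm hc, hc]

-- Set.update adds nothing when every new element is already present
theorem set_update_self {α : Type} [BEq α] [LawfulBEq α] (s : PySem.Set α) (xs : List α)
    (h : ∀ x ∈ xs, x ∈ s) : PySem.Set.update s xs = s := by
  rw [PySem.Set.update_eq_append_filter]
  have : (PySem.Set.ofList xs).filter (fun y => !PySem.Set.contains s y) = [] := by
    rw [List.filter_eq_nil_iff]
    intro x hx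
    have hmem : x ∈ s := h x ((PySem.Set.mem_ofList xs x).mp hx)
    simp [hmem]
  rw [this, List.append_nil]

-- A's whole mapping loop, read off at one index
theorem outerFold_getD (ss : List String) (hne : ss ≠ []) (field bucket : String)
    (l : List (List (String × String)))
    (d : PySem.Dict Int (PySem.Dict String (List (List (String × String))))) (i : Int) :
    (l.foldl (pvAStep ss field bucket) d).getD i pvInner0
      = (l.filter (fun it => pvTag ss field it == i)).foldl
          (fun inner it => inner.modify bucket [] (· ++ [it])) (d.getD i pvInner0) := by
  rw [pvAStep_eq ss hne]
  induction l generalizing d with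
  | nil => rfl
  | cons it t ih =>
      simp only [List.foldl_cons, List.filter_cons]
      by_cases hi : pvTag ss field it = i
      · simp only [hi, beq_self_eq_true, if_pos, List.foldl_cons]
        rw [ih, PySem.Dict.getD_modify]
        simp
      · have : (pvTag ss field it == i) = false := by simp [hi]
        simp only [this, if_neg Bool.false_ne_true, ih]
        rw [PySem.Dict.getD_modify]
        simp [Ne.symm hi]

theorem pvAStep_nil (field bucket : String) : pvAStep [] field bucket = fun d _ => d := by
  funext d it
  simp [pvAStep, PySem.List.enumerate_nil, pvAFind]

theorem init_items (m : Int) :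
    ((PySem.List.pyRange 0 m 1).foldl (fun d i => d.insert i pvInner0) PySem.Dict.empty).items
      = (PySem.List.pyRange 0 m 1).map (fun i => (i, pvInner0)) := by
  rw [PySem.Dict.items_foldl_insert_fresh (PySem.List.pyRange 0 m 1) (fun i => i)
        (fun _ => pvInner0) PySem.Dict.empty
        (fun a _ => PySem.Dict.contains_empty a)
        (by simpa using PySem.List.nodup_pyRange_one 0 m)]
  rfl

theorem init_keys (m : Int) :
    ((PySem.List.pyRange 0 m 1).foldl (fun d i => d.insert i pvInner0) PySem.Dict.empty).keys
      = PySem.List.pyRange 0 m 1 := by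
  rw [PySem.Dict.keys_foldl_insert, PySem.Dict.keys_empty, PySem.Set.update_nil_left,
      PySem.Set.ofList_eq_self_of_nodup _ (PySem.List.nodup_pyRange_one 0 m)]

theorem init_getD (m : Int) (i : Int) (hi : i ∈ PySem.List.pyRange 0 m 1) :
    ((PySem.List.pyRange 0 m 1).foldl (fun d i => d.insert i pvInner0) PySem.Dict.empty).getD i pvInner0
      = pvInner0 := by
  apply PySem.Dict.getD_of_mem_items
  · rw [init_items]
    exact List.mem_map.mpr ⟨i, hi, rfl⟩
  · rw [init_keys]
    exact PySem.List.nodup_pyRange_one 0 m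

theorem pvInner0_keys : pvInner0.keys = ["concepts", "relationships"] := by decide

-- the per-index inner dict after both of A's loops: literally the two buckets
theorem X_items (cs rs : List (List (String × String))) :
    ((rs.foldl (fun inner it => inner.modify "relationships" [] (· ++ [it]))
        (cs.foldl (fun inner it => inner.modify "concepts" [] (· ++ [it])) pvInner0))).items
      = [("concepts", cs), ("relationships", rs)] := by
  have hk : ((rs.foldl (fun inner it => inner.modify "relationships" [] (· ++ [it]))
      (cs.foldl (fun inner it => inner.modify "concepts" [] (· ++ [it])) pvInner0))).keys
      = ["concepts", "relationships"] := by
    rw [PySem.Dict.keys_foldl_modify_key rs (fun _ => "relationships"),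
        PySem.Dict.keys_foldl_modify_key cs (fun _ => "concepts"), pvInner0_keys,
        set_update_self _ _ (by intro x hx; simp at hx; simp [hx]),
        set_update_self _ _ (by intro x hx; simp at hx; simp [hx])]
  rw [PySem.Dict.items_eq_map_keys _ (by rw [hk]; decide) [], hk]
  simp only [List.map_cons, List.map_nil]
  rw [innerFold_getD, innerFold_getD, innerFold_getD, innerFold_getD]
  simp [pvInner0, PySem.Dict.getD_insert]

-- A's loops keep the key set unchanged
theorem foldA_keys (ss : List String) (hne : ss ≠ []) (field bucket : String)
    (l : List (List (String × String)))
    (d : PySem.Dict Int (PySem.Dict String (List (List (String × String)))))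
    (hk : d.keys = PySem.List.pyRange 0 (ss.length : Int) 1) :
    (l.foldl (pvAStep ss field bucket) d).keys = PySem.List.pyRange 0 (ss.length : Int) 1 := by
  rw [pvAStep_eq ss hne, PySem.Dict.keys_foldl_modify_key l (pvTag ss field), hk]
  apply set_update_self
  intro x hx
  rcases List.mem_map.mp hx with ⟨it, _, rfl⟩
  have := pvTag_bound ss hne field it
  exact (PySem.List.mem_pyRange_one).mpr ⟨this.1, this.2⟩

-- ===== B-side lemmas =====
-- the split of one sentence step: matched names are inserted, the rest survive in order
theorem pvStep_foldl (low : String) (i : Int) (p : List String)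
    (t : PySem.Dict String Int) (acc : List String) :
    p.foldl (fun (q : PySem.Dict String Int × List String) n =>
        if PySem.Str.isIn n low then (q.1.insert n i, q.2) else (q.1, q.2 ++ [n])) (t, acc)
      = ((p.filter (fun n => PySem.Str.isIn n low)).foldl (fun d n => d.insert n i) t,
         acc ++ p.filter (fun n => !(PySem.Str.isIn n low))) := by
  induction p generalizing t acc with
  | nil => simp
  | cons n rest ih =>
      rw [List.foldl_cons, List.filter_cons, List.filter_cons]
      by_cases h : PySem.Str.isIn n low = true
      · have hb : (!PySem.Str.isIn n low) = false := by rw [h]; rfl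
        rw [if_pos h, ih, if_pos h, hb, if_neg Bool.false_ne_true, List.foldl_cons]
      · have hf : PySem.Str.isIn n low = false := Bool.not_eq_true _ ▸ (by simpa using h)
        have hb : (!PySem.Str.isIn n low) = true := by rw [hf]; rfl
        rw [if_neg h, ih, if_neg h, hb, if_pos rfl]
        simp

theorem getD_foldl_insert (i : Int) (l : List String) (t : PySem.Dict String Int) (n : String) :
    (l.foldl (fun d m => d.insert m i) t).getD n 0 = if n ∈ l then i else t.getD n 0 := by
  induction l generalizing t with
  | nil => simp
  | cons m rest ih =>
      rw [List.foldl_cons, ih]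
      by_cases h : n ∈ rest
      · simp [h]
      · by_cases hm : n = m <;> simp [h, hm, PySem.Dict.getD_insert]

-- the whole scan, read off at one name: first-match index if found, untouched otherwise
theorem pvScan_getD (l : List (Int × String)) (p : List String)
    (t : PySem.Dict String Int) (n : String) :
    (pvScan t p l).getD n 0
      = if n ∈ p then
          (match pvAFind n l with
           | some i => i
           | none => t.getD n 0)
        else t.getD n 0 := by
  induction l generalizing p t with
  | nil =>
      simp only [pvScan, pvAFind]
      split <;> rfl
  | cons hd rest ih =>
      obtain ⟨i, s⟩ := hd
      by_cases hp : p.isEmpty = true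
      · have hpn : p = [] := List.isEmpty_iff.mp hp
        subst hpn
        simp [pvScan]
      · simp only [pvScan, hp, if_neg Bool.false_ne_true, pvStep_foldl, ih, pvAFind]
        by_cases hmem : n ∈ p <;>
          by_cases hin : PySem.Chars.isIn n.toList (PySem.Chars.lower s.toList) = true <;>
            cases hfind : pvAFind n rest <;>
              simp [PySem.Str.isIn, List.mem_filter, hmem, hin, getD_foldl_insert]

-- for any name in the initial worklist, the table holds A's target index
theorem tag_getD (ns ss : List String) (n : String) (hn : n ∈ ns) :
    (pvScan PySem.Dict.empty (PySem.List.dedup ns) (PySem.List.enumerate ss 0)).getD n 0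
      = (pvAFind n (PySem.List.enumerate ss 0)).getD 0 := by
  rw [pvScan_getD, if_pos (by simpa using (PySem.List.mem_dedup ns n).mpr hn)]
  cases pvAFind n (PySem.List.enumerate ss 0) <;> simp [PySem.Dict.getD_empty]

-- a filtered zip of a list with its own map projects back to a filter of the list
theorem zip_map_filter {α β : Type} (f : α → β) (P : β → Bool) (l : List α) :
    ((l.zip (l.map f)).filter (fun p => P p.2)).map Prod.fst
      = l.filter (fun x => P (f x)) := by
  induction l with
  | nil => rfl
  | cons x xs ih =>
      simp only [List.map_cons, List.zip_cons_cons, List.filter_cons]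
      by_cases h : P (f x) = true
      · simp [h, ih]
      · simp only [Bool.not_eq_true] at h
        simp [h, ih]

-- reading one bucket dict off at an index: the items whose tag is that index, in order
theorem bucket_getD {β : Type} (t : β → Int) (g : β → List (String × String)) (l : List β) (i : Int) :
    (l.foldl (fun d p => d.modify (t p) [] (· ++ [g p])) PySem.Dict.empty).getD i []
      = (l.filter (fun p => t p == i)).map g := by
  have h1 : l.foldl (fun d p => d.modify (t p) [] (· ++ [g p])) PySem.Dict.empty
      = (l.map (fun p => (t p, g p))).foldl (fun d q => d.modify q.1 [] (· ++ [q.2])) PySem.Dict.empty := by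
    rw [List.foldl_map]
  rw [h1, PySem.Dict.getD_foldl_modify_append, PySem.Dict.getD_empty, List.filter_map, List.map_map]
  simp [Function.comp_def]

-- B's bucket at index i is A's filter by target index
theorem bucketB_eq (l : List (List (String × String))) (field : String) (ss : List String)
    (tag : PySem.Dict String Int) (i : Int)
    (htag : ∀ it ∈ l, tag.getD (PySem.Str.lower ((List.lookup field it).getD "")) 0
        = pvTag ss field it) :
    ((l.zip (l.map (fun c => PySem.Str.lower ((List.lookup field c).getD "")))).filter
        (fun p => tag.getD p.2 0 == i)).map Prod.fst
      = l.filter (fun it => pvTag ss field it == i) := by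
  rw [zip_map_filter (fun c => PySem.Str.lower ((List.lookup field c).getD "")) (fun x => tag.getD x 0 == i) l]
  apply List.filter_congr
  intro it hit
  rw [htag it hit]

-- ===== VERDICT (by name: the statement is the Claim_ definition above) =====
theorem map_concepts_to_sentences_spec : Claim_equal_map_concepts_to_sentences := by
  intro concepts relationships sentences _
  unfold Spec_map_concepts_to_sentences
  by_cases hS : sentences = []
  · subst hS
    simp [map_concepts_to_sentences, map_concepts_to_sentences_alt, pvAStep_nil, List.foldl_fixed]
    rfl
  · simp only [map_concepts_to_sentences, map_concepts_to_sentences_alt]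
    have hnd := PySem.List.nodup_pyRange_one 0 (sentences.length : Int)
    have hK1 := foldA_keys sentences hS "name" "concepts" concepts _ (init_keys _)
    have hK2 := foldA_keys sentences hS "to" "relationships" relationships _ hK1
    rw [PySem.Dict.items_eq_map_keys _ (by rw [hK2]; exact hnd) pvInner0, hK2, List.map_map]
    apply List.map_congr_left
    intro i hi
    rw [Function.comp_apply,
        outerFold_getD sentences hS "to" "relationships",
        outerFold_getD sentences hS "name" "concepts",
        init_getD _ i hi, X_items]
    refine Prod.ext rfl ?_
    rw [bucket_getD, bucket_getD]
    rw [bucketB_eq concepts "name" sentences _ i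
          (fun it _ => by
            rw [tag_getD _ sentences _
                  (List.mem_append_left _ (List.mem_map_of_mem (a := it) (by assumption)))]
            rfl),
        bucketB_eq relationships "to" sentences _ i
          (fun it _ => by
            rw [tag_getD _ sentences _
                  (List.mem_append_right _ (List.mem_map_of_mem (a := it) (by assumption)))]
            rfl)]
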